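-- pv_equiv track=rewrite | github.com/SeaC0w/AI_Project | ChessSimAI.py | findPiecePos
-- ===== SOURCE A (Python) =====
-- def findPiecePos(piece, board):
-- 	Pos = None
-- 	rowNum = 0
-- 	for row in board:
-- 		colNum = 0
-- 		for col in row:
-- 			if (col == piece):
-- 				Pos = [rowNum, colNum]
--
-- 			colNum += 1
-- 		rowNum +=1
-- 	return Pos
-- ===== SOURCE B (Python) =====
-- def findPiecePos(piece, board):
--     for rowNum in range(len(board) - 1, -1, -1):
--         row = board[rowNum]
--         for colNum in range(len(row) - 1, -1, -1):
--             if row[colNum] == piece: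
--                 return [rowNum, colNum]
--     return None
-- ===== Notes on version B (the rewrite author's own statement) =====
-- stated objective: simpler
-- what changed: Replaces A's full-board scan that overwrites an accumulator on every match with a reverse search that returns the first match found scanning from the end, exiting early.
import Mathlib
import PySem

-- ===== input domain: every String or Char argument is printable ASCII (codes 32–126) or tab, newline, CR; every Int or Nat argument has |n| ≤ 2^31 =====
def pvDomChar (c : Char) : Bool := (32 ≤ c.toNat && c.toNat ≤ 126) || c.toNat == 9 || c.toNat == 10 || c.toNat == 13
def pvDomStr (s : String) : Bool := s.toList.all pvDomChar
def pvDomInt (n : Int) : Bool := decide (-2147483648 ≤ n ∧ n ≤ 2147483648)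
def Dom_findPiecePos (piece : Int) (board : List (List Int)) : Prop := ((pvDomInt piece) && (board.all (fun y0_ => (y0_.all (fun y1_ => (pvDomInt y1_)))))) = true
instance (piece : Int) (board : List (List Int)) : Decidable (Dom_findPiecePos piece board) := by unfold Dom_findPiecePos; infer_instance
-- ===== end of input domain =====

-- B scans the board backwards (reverse index loops) and returns the first match,
-- instead of A's full forward scan that overwrites an accumulator on every match.
-- Return values proved equal on all inputs; neither mutates its arguments.

-- ===== PORT A =====
-- A: nested forward folds carrying (Pos, rowNum) / (Pos, colNum) exactly as the Python does.
def findPiecePos (piece : Int) (board : List (List Int)) : Option (List Int) :=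
  (board.foldl
    (fun (st : Option (List Int) × Int) row =>
      let st2 := row.foldl
        (fun (st2 : Option (List Int) × Int) col =>
          ((if col = piece then some [st.2, st2.2] else st2.1), st2.2 + 1))
        (st.1, 0)
      (st2.1, st.2 + 1))
    ((none : Option (List Int)), (0 : Int))).1

-- ===== PORT B =====
-- index/value pairs, index counted as Python ints
def pvIdx {α : Type} (i : Int) : List α → List (Int × α)
  | [] => []
  | x :: xs => (i, x) :: pvIdx (i + 1) xs

-- inner reverse loop: first match scanning the reversed (colNum, value) list
def pvColScan (piece : Int) : List (Int × Int) → Option Int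
  | [] => none
  | (c, v) :: rest => if v = piece then some c else pvColScan piece rest

-- outer reverse loop over the reversed (rowNum, row) list, early return
def pvRowScan (piece : Int) : List (Int × List Int) → Option (List Int)
  | [] => none
  | (r, row) :: rest =>
    match pvColScan piece (pvIdx 0 row).reverse with
    | some c => some [r, c]
    | none => pvRowScan piece rest

def findPiecePos_alt (piece : Int) (board : List (List Int)) : Option (List Int) :=
  pvRowScan piece (pvIdx 0 board).reverse

-- ===== PRECONDITION & SPEC =====
def Spec_findPiecePos (piece : Int) (board : List (List Int)) (out : Option (List Int)) : Prop := out = findPiecePos_alt piece board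
instance (piece : Int) (board : List (List Int)) (out : Option (List Int)) : Decidable (Spec_findPiecePos piece board out) := by unfold Spec_findPiecePos; infer_instance

-- ===== CLAIM (what is proved, stated in full; the proofs are below) =====
def Claim_equal_findPiecePos : Prop := ∀ (piece : Int) (board : List (List Int)), Dom_findPiecePos piece board → Spec_findPiecePos piece board (findPiecePos piece board)

-- ===== LEMMAS AND PROOFS =====

-- last match of a (colNum, value) list, scanning forward
def pvColLast (piece : Int) : List (Int × Int) → Option Int
  | [] => none
  | (c, v) :: rest =>
    match pvColLast piece rest with
    | some x => some x
    | none => if v = piece then some c else none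

-- last matching row's result, scanning forward
def pvRowLast (piece : Int) : List (Int × List Int) → Option (List Int)
  | [] => none
  | (r, row) :: rest =>
    match pvRowLast piece rest with
    | some x => some x
    | none =>
      match pvColLast piece (pvIdx 0 row) with
      | some c => some [r, c]
      | none => none

theorem pvColScan_append (piece : Int) (a b : List (Int × Int)) :
    pvColScan piece (a ++ b) =
      match pvColScan piece a with
      | some x => some x
      | none => pvColScan piece b := by
  induction a with
  | nil => simp [pvColScan]
  | cons hd tl ih =>
    obtain ⟨c, v⟩ := hd
    simp only [List.cons_append, pvColScan]
    split_ifs with h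
    · rfl
    · exact ih

theorem pvColScan_reverse (piece : Int) (l : List (Int × Int)) :
    pvColScan piece l.reverse = pvColLast piece l := by
  induction l with
  | nil => rfl
  | cons hd tl ih =>
    obtain ⟨c, v⟩ := hd
    rw [List.reverse_cons, pvColScan_append, ih]
    cases h : pvColLast piece tl <;> simp [pvColLast, pvColScan, h]

theorem pvRowScan_append (piece : Int) (a b : List (Int × List Int)) :
    pvRowScan piece (a ++ b) =
      match pvRowScan piece a with
      | some x => some x
      | none => pvRowScan piece b := by
  induction a with
  | nil => simp [pvRowScan]
  | cons hd tl ih =>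
    obtain ⟨r, row⟩ := hd
    simp only [List.cons_append, pvRowScan]
    cases pvColScan piece (pvIdx 0 row).reverse
    · exact ih
    · rfl

theorem pvRowScan_reverse (piece : Int) (l : List (Int × List Int)) :
    pvRowScan piece l.reverse = pvRowLast piece l := by
  induction l with
  | nil => rfl
  | cons hd tl ih =>
    obtain ⟨r, row⟩ := hd
    rw [List.reverse_cons, pvRowScan_append, ih]
    cases h : pvRowLast piece tl <;>
      cases h2 : pvColLast piece (pvIdx 0 row) <;>
      simp [pvRowLast, pvRowScan, pvColScan_reverse, h, h2]

-- A's inner fold computes the last column match (overwriting), with colNum threaded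
theorem innerFold_eq (piece r : Int) (row : List Int) (p : Option (List Int)) (c0 : Int) :
    row.foldl
      (fun (st2 : Option (List Int) × Int) col =>
        ((if col = piece then some [r, st2.2] else st2.1), st2.2 + 1)) (p, c0) =
      ((match pvColLast piece (pvIdx c0 row) with
        | some c => some [r, c]
        | none => p), c0 + row.length) := by
  induction row generalizing p c0 with
  | nil => simp [pvColLast, pvIdx]
  | cons v rest ih =>
    simp only [List.foldl_cons, ih, pvIdx, pvColLast]
    cases pvColLast piece (pvIdx (c0 + 1) rest) <;> split_ifs <;>
      refine Prod.ext ?_ ?_ <;> simp <;> push_cast <;> ring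

-- A's outer fold computes the last row match, with rowNum threaded
theorem outerFold_eq (piece : Int) (board : List (List Int)) (p : Option (List Int)) (r0 : Int) :
    board.foldl
      (fun (st : Option (List Int) × Int) row =>
        let st2 := row.foldl
          (fun (st2 : Option (List Int) × Int) col =>
            ((if col = piece then some [st.2, st2.2] else st2.1), st2.2 + 1))
          (st.1, 0)
        (st2.1, st.2 + 1)) (p, r0) =
      ((match pvRowLast piece (pvIdx r0 board) with
        | some x => some x
        | none => p), r0 + board.length) := by
  induction board generalizing p r0 with
  | nil => simp [pvRowLast, pvIdx]
  | cons row rest ih =>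
    rw [List.foldl_cons, innerFold_eq, ih]
    simp only [pvIdx, pvRowLast]
    cases pvRowLast piece (pvIdx (r0 + 1) rest) <;>
      cases pvColLast piece (pvIdx 0 row) <;>
      refine Prod.ext ?_ ?_ <;> simp <;> push_cast <;> ring

-- ===== VERDICT (by name: the statement is the Claim_ definition above) =====
theorem findPiecePos_spec : Claim_equal_findPiecePos := by
  intro piece board _
  unfold Spec_findPiecePos findPiecePos findPiecePos_alt
  rw [outerFold_eq, pvRowScan_reverse]
  cases pvRowLast piece (pvIdx 0 board) <;> rfl
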